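-- pv_equiv track=rewrite | github.com/HomenShum/nodebench-qa | daas/compile_down/playbook_induction.py | _consensus_string
-- ===== SOURCE A (Python) =====
-- def _consensus_string(values: list[str]) -> str:
--     """Return the most-frequent non-empty value, or the longest."""
--     filt = [v.strip() for v in values if v and v.strip()]
--     if not filt:
--         return ""
--     counts: dict[str, int] = {}
--     for v in filt:
--         counts[v] = counts.get(v, 0) + 1
--     # Most frequent
--     best = max(counts, key=lambda k: (counts[k], len(k)))
--     return best[:120]
-- ===== SOURCE B (Python) =====
-- def _consensus_string(values: list[str]) -> str:
--     """Return the most-frequent non-empty value, or the longest."""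
--     filt = [v.strip() for v in values if v and v.strip()]
--     if not filt:
--         return ""
--     # Successive extraction: repeatedly take the first remaining value, count
--     # its whole equivalence class, remove it, and keep a running champion.
--     # Strict improvement only, so ties keep the earlier (first-appearing) value.
--     best, best_count = None, 0
--     rest = filt
--     while rest:
--         v = rest[0]
--         c = rest.count(v)
--         rest = [x for x in rest if x != v]
--         if best is None or c > best_count or (c == best_count and len(v) > len(best)):
--             best, best_count = v, c
--     return best[:120]
-- ===== Notes on version B (the rewrite author's own statement) =====
-- stated objective: alternative
-- what changed: B replaces A's dict-counting pass plus max over dict keys by a while loop that repeatedly extracts the first remaining value's whole equivalence class from the list (count it, filter it out) while keeping a running champion under strict (count, length) improvement, which preserves A's first-appearance tie-break.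
import Mathlib
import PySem

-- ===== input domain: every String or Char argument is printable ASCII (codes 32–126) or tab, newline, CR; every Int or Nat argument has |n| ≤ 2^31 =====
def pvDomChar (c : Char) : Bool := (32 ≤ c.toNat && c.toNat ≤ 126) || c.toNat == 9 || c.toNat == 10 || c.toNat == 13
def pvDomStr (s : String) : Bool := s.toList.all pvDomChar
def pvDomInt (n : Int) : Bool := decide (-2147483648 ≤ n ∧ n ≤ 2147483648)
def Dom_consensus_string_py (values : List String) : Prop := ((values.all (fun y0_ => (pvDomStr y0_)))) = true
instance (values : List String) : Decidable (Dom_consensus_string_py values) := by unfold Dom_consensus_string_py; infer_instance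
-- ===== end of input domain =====

-- B replaces A's counts dict + max over keys by a while loop that repeatedly
-- extracts the first remaining value's equivalence class from the list while
-- keeping a running champion (strict improvement) — alternative, not faster.

-- ===== PORT A =====
def consensus_string_py (values : List String) : String :=
  -- filt = [v.strip() for v in values if v and v.strip()]
  let filt := (values.filter (fun v => !(v == "") && !(PySem.Str.strip v == ""))).map PySem.Str.strip
  if filt = [] then ""
  else
    -- counts[v] = counts.get(v, 0) + 1
    let counts : PySem.Dict String Int :=
      filt.foldl (fun d v => d.insert v (d.getD v 0 + 1)) PySem.Dict.empty
    -- best = max(counts, key=lambda k: (counts[k], len(k)))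
    match PySem.List.max2? counts.keys (fun k => counts.getD k 0) (fun k => PySem.Str.len k) with
    | some best => PySem.Str.slice best none (some 120)   -- best[:120]
    | none => ""   -- unreachable: counts is nonempty here

-- ===== PORT B =====
-- the while loop of Source B: state (rest, best, best_count); each round counts the
-- head's class in rest, removes it, and updates the champion on strict improvement
def consensusLoop : List String → Option String → Int → Option String
  | [], best, _ => best
  | v :: t, best, bc =>
    -- c = rest.count(v); rest = [x for x in rest if x != v]
    let c : Int := (PySem.List.count (v :: t) v : Int)
    let rest := (v :: t).filter (fun x => !(x == v))
    match best with
    | none => consensusLoop rest (some v) c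
    | some b =>
      if decide (c > bc) || ((c == bc) && decide (PySem.Str.len v > PySem.Str.len b))
      then consensusLoop rest (some v) c
      else consensusLoop rest (some b) bc
termination_by l _ _ => l.length
decreasing_by all_goals
  simp only [List.filter_cons, BEq.rfl, Bool.not_true, Bool.false_eq_true, if_false, List.length_cons]
  exact Nat.lt_succ_of_le (List.length_filter_le _ _)

def consensus_string_py_alt (values : List String) : String :=
  -- filt = [v.strip() for v in values if v and v.strip()]
  let filt := (values.filter (fun v => !(v == "") && !(PySem.Str.strip v == ""))).map PySem.Str.strip
  if filt = [] then ""
  else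
    match consensusLoop filt none 0 with
    | some best => PySem.Str.slice best none (some 120)   -- best[:120]
    | none => ""   -- unreachable: filt is nonempty here

-- ===== PRECONDITION & SPEC =====
def Spec_consensus_string_py (values : List String) (out : String) : Prop := out = consensus_string_py_alt values
instance (values : List String) (out : String) : Decidable (Spec_consensus_string_py values out) := by unfold Spec_consensus_string_py; infer_instance

-- ===== CLAIM (what is proved, stated in full; the proofs are below) =====
def Claim_equal_consensus_string_py : Prop := ∀ (values : List String), Dom_consensus_string_py values → Spec_consensus_string_py values (consensus_string_py values)

-- ===== LEMMAS AND PROOFS =====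

-- Python's max(xs, key=lambda v: (k1, k2)) as a fold step (exactly PySem.List.max2?'s step)
def pvLt (k1 k2 : String → Int) (a b : String) : Bool :=
  decide (k1 a < k1 b) || (!decide (k1 b < k1 a) && decide (k2 a < k2 b))

def pvStep (k1 k2 : String → Int) (acc : Option String) (x : String) : Option String :=
  match acc with
  | none => some x
  | some m => if pvLt k1 k2 m x then some x else some m

theorem pvMax2_eq_foldl (k1 k2 : String → Int) (xs : List String) :
    PySem.List.max2? xs k1 k2 = xs.foldl (pvStep k1 k2) none := by
  unfold PySem.List.max2?
  congr 1
  funext acc x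
  cases acc <;> simp [pvStep, pvLt]

-- first-occurrence dedup by successive class removal (the traversal order of B's loop)
def dedupF : List String → List String
  | [] => []
  | v :: t => v :: dedupF (t.filter (fun x => !(x == v)))
termination_by l => l.length
decreasing_by
  simp only [List.length_cons, List.length_unattach]
  exact Nat.lt_succ_of_le (le_trans (List.length_filter_le _ _) (by simp))

theorem foldl_add_eq_dedupF :
    ∀ (xs s : List String),
      xs.foldl PySem.Set.add s = s ++ dedupF (xs.filter (fun x => !(decide (x ∈ s)))) := by
  intro xs
  induction xs with
  | nil => intro s; simp [dedupF]
  | cons v t ih =>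
    intro s
    rw [List.foldl_cons]
    by_cases hv : v ∈ s
    · rw [PySem.Set.add_of_mem hv]
      simp only [List.filter_cons, hv, decide_true, Bool.not_true]
      exact ih s
    · rw [PySem.Set.add_of_not_mem hv, ih (s ++ [v])]
      simp only [List.filter_cons, hv, decide_false, Bool.not_false, if_true]
      rw [dedupF]
      rw [List.filter_filter]
      have hp : ∀ x ∈ t, (!(x == v) && !(decide (x ∈ s))) = !(decide (x ∈ s ++ [v])) := by
        intro x _
        by_cases h1 : x = v <;> by_cases h2 : x ∈ s <;> simp [h1, h2]
      rw [List.filter_congr hp]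
      simp

theorem ofList_eq_dedupF (xs : List String) : PySem.Set.ofList xs = dedupF xs := by
  rw [PySem.Set.ofList_eq_foldl, foldl_add_eq_dedupF xs []]
  simp

theorem count_filter_ne (t : List String) (v w : String) (h : ¬ (w = v)) :
    (t.filter (fun x => !(x == v))).count w = t.count w := by
  induction t with
  | nil => rfl
  | cons x t ih =>
    by_cases hx : x = v
    · subst hx
      simp [List.filter_cons, List.count_cons, Ne.symm h, ih]
    · simp [List.filter_cons, hx, List.count_cons, ih]

-- B's strict-improvement test equals the tuple-max test of max2?
theorem cond_eq (cv cb lv lb : Int) :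
    (decide (cb < cv) || ((cv == cb) && decide (lb < lv))) =
    (decide (cb < cv) || (!decide (cv < cb) && decide (lb < lv))) := by
  by_cases h1 : cb < cv <;> by_cases h2 : cv < cb <;> by_cases h3 : cv = cb <;>
    simp [h1, h2, h3] <;> omega

theorem consensusLoop_eq (k1 : String → Int) :
    ∀ (n : Nat) (rest : List String), rest.length ≤ n →
      (∀ w ∈ rest, (rest.count w : Int) = k1 w) →
      ∀ (macc : Option String) (bc : Int), (∀ b, macc = some b → bc = k1 b) →
        consensusLoop rest macc bc =
          (dedupF rest).foldl (pvStep k1 (fun v => PySem.Str.len v)) macc := by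
  intro n
  induction n with
  | zero =>
    intro rest hlen _ macc bc _
    have : rest = [] := List.length_eq_zero_iff.mp (Nat.le_zero.mp hlen)
    subst this
    cases macc <;> simp [consensusLoop, dedupF]
  | succ m ih =>
    intro rest hlen hcnt macc bc hbc
    cases rest with
    | nil => cases macc <;> simp [consensusLoop, dedupF]
    | cons v t =>
      have hc : ((v :: t).count v : Int) = k1 v := hcnt v (List.mem_cons_self )
      have hfilter : (v :: t).filter (fun x => !(x == v)) = t.filter (fun x => !(x == v)) := by
        simp [List.filter_cons]
      have hrest' : ∀ w ∈ t.filter (fun x => !(x == v)),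
          ((t.filter (fun x => !(x == v))).count w : Int) = k1 w := by
        intro w hw
        have hmem := List.mem_filter.mp hw
        have hwv : ¬ (w = v) := by simpa using hmem.2
        rw [count_filter_ne t v w hwv]
        have := hcnt w (List.mem_cons_of_mem v hmem.1)
        rw [List.count_cons] at this
        simpa [Ne.symm hwv] using this
      have hlen' : (t.filter (fun x => !(x == v))).length ≤ m :=
        le_trans (List.length_filter_le _ _) (Nat.le_of_succ_le_succ hlen)
      have hded : dedupF (v :: t) = v :: dedupF (t.filter (fun x => !(x == v))) := by
        rw [dedupF]
      cases macc with
      | none =>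
        rw [consensusLoop, hded, List.foldl_cons]
        simp only [PySem.List.count_eq, hfilter, hc]
        show consensusLoop _ (some v) (k1 v) = List.foldl _ (some v) _
        exact ih _ hlen' hrest' (some v) (k1 v) (by intro b hb; cases hb; rfl)
      | some b =>
        have hbcb : bc = k1 b := hbc b rfl
        rw [consensusLoop, hded, List.foldl_cons]
        simp only [PySem.List.count_eq, hfilter, hc, hbcb]
        have hcond : (decide (k1 b < k1 v) || ((k1 v == k1 b) &&
            decide (PySem.Str.len b < PySem.Str.len v))) =
            pvLt k1 (fun v => PySem.Str.len v) b v := by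
          unfold pvLt
          exact cond_eq (k1 v) (k1 b) (PySem.Str.len v) (PySem.Str.len b)
        show (if _ then consensusLoop _ (some v) (k1 v) else consensusLoop _ (some b) (k1 b)) =
          List.foldl _ (if pvLt k1 (fun v => PySem.Str.len v) b v then some v else some b) _
        rw [← hcond]
        by_cases h : (decide (k1 b < k1 v) || ((k1 v == k1 b) &&
            decide (PySem.Str.len b < PySem.Str.len v))) = true
        · rw [if_pos h, if_pos h]
          exact ih _ hlen' hrest' (some v) (k1 v) (by intro b' hb'; cases hb'; rfl)
        · rw [if_neg h, if_neg h]
          exact ih _ hlen' hrest' (some b) (k1 b) (by intro b' hb'; cases hb'; rfl)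

-- ===== VERDICT (by name: the statement is the Claim_ definition above) =====
theorem consensus_string_py_spec : Claim_equal_consensus_string_py := by
  intro values _
  unfold Spec_consensus_string_py consensus_string_py consensus_string_py_alt
  set filt := (values.filter (fun v => !(v == "") && !(PySem.Str.strip v == ""))).map PySem.Str.strip with hfilt
  by_cases hnil : filt = []
  · simp [hnil]
  · simp only [if_neg hnil]
    have hkeys : (filt.foldl (fun d v => d.insert v (d.getD v 0 + 1))
        (PySem.Dict.empty : PySem.Dict String Int)).keys = PySem.Set.ofList filt := by
      rw [PySem.Dict.keys_foldl_insert]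
      simp [PySem.Set.update_nil_left]
    have hget : (fun k => (filt.foldl (fun d v => d.insert v (d.getD v 0 + 1))
        (PySem.Dict.empty : PySem.Dict String Int)).getD k 0) =
        (fun v => (filt.count v : Int)) := by
      funext v
      rw [PySem.Dict.getD_foldl_insert_add_one]
      simp
    rw [hkeys, hget, pvMax2_eq_foldl, ofList_eq_dedupF]
    rw [consensusLoop_eq (fun v => (filt.count v : Int)) filt.length filt (le_refl _)
      (fun w _ => rfl) none 0 (by intro b hb; cases hb)]
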